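-- pv_equiv track=rewrite | github.com/noahbean33/MemGaze-Assumptions-Simulation | memgaze_simulation.py | periodic_access
-- ===== SOURCE A (Python) =====
-- from typing import List, Tuple, Dict
--
-- def periodic_access(mem_space: List[int], num_accesses: int, period: int = 100) -> List[int]:
--     addresses = []
--     mem_len = len(mem_space)
--     for i in range(num_accesses):
--         idx = i % period
--         addr = idx % mem_len
--         addresses.append(mem_space[addr])
--     return addresses
-- ===== SOURCE B (Python) =====
-- from typing import List
--
-- def periodic_access(mem_space: List[int], num_accesses: int, period: int = 100) -> List[int]:
--     if num_accesses <= 0: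
--         return []
--     mem_len = len(mem_space)
--     block = [mem_space[i % mem_len] for i in range(period)]
--     return (block * (num_accesses // period + 1))[:num_accesses]
-- ===== Notes on version B (the rewrite author's own statement) =====
-- stated objective: alternative
-- what changed: B precomputes one period's worth of values as a block and builds the result by tiling copies of that block and truncating, instead of A's element-by-element loop; Pre_ excludes inputs where A raises (period == 0 or empty mem_space with num_accesses > 0) and negative periods, which are malformed input outside the function's natural domain even though A happens to return a value there.
-- outside the precondition, e.g. on periodic_access([10, 20], 3, -2): A returns [10, 20, 10], B returns []
import Mathlib
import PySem

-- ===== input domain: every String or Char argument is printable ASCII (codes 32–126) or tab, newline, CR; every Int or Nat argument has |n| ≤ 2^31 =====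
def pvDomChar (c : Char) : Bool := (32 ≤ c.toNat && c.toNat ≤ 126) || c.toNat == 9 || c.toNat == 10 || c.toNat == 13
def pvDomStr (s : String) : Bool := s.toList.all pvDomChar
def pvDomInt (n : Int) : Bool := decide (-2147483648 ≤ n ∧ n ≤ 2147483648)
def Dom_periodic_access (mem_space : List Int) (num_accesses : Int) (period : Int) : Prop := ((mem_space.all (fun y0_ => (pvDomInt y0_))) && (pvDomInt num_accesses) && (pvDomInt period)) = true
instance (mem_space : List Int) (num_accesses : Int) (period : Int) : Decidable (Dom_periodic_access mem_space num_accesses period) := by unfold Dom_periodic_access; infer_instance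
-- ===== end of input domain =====

-- B fills the output by tiling one precomputed period-block instead of A's per-element loop (alternative decomposition, same result on the natural domain period > 0).

-- ===== PORT A =====
def periodic_access (mem_space : List Int) (num_accesses : Int) (period : Int) : List Int :=
  let mem_len : Int := (mem_space.length : Int)
  (PySem.List.pyRange 0 num_accesses 1).foldl (fun addresses i =>
    let idx := PySem.Int.mod i period
    let addr := PySem.Int.mod idx mem_len
    addresses ++ [PySem.List.pyGetD mem_space addr 0]) []

-- ===== PORT B =====
def periodic_access_alt (mem_space : List Int) (num_accesses : Int) (period : Int) : List Int :=
  if num_accesses ≤ 0 then []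
  else
    let mem_len : Int := (mem_space.length : Int)
    let block := (PySem.List.pyRange 0 period 1).map (fun i =>
      PySem.List.pyGetD mem_space (PySem.Int.mod i mem_len) 0)
    let reps := PySem.Int.floordiv num_accesses period + 1
    (PySem.List.pyRepeat block reps).take num_accesses.toNat   -- (block * reps)[:n] with 0 < n is take n

-- ===== PRECONDITION & SPEC =====
-- Pre_ excludes the inputs where A raises (period == 0 or empty mem_space, with num_accesses > 0)
-- and, beyond that, negative periods: a negative period is malformed input outside the function's
-- natural domain (A happens to return a value there by Python's negative-modulo accident).
def Pre_periodic_access (mem_space : List Int) (num_accesses : Int) (period : Int) : Prop :=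
  num_accesses ≤ 0 ∨ (0 < period ∧ mem_space ≠ [])
instance (mem_space : List Int) (num_accesses : Int) (period : Int) : Decidable (Pre_periodic_access mem_space num_accesses period) := by unfold Pre_periodic_access; infer_instance
def pvWitness_periodic_access : List Int × Int × Int := ([10, 20, 30], 7, 2)

def Spec_periodic_access (mem_space : List Int) (num_accesses : Int) (period : Int) (out : List Int) : Prop := out = periodic_access_alt mem_space num_accesses period
instance (mem_space : List Int) (num_accesses : Int) (period : Int) (out : List Int) : Decidable (Spec_periodic_access mem_space num_accesses period out) := by unfold Spec_periodic_access; infer_instance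

-- ===== CLAIM (what is proved, stated in full; the proofs are below) =====
def Claim_equal_periodic_access : Prop := ∀ (mem_space : List Int) (num_accesses : Int) (period : Int), Dom_periodic_access mem_space num_accesses period → Pre_periodic_access mem_space num_accesses period → Spec_periodic_access mem_space num_accesses period (periodic_access mem_space num_accesses period)

-- ===== LEMMAS AND PROOFS =====

-- the value A places at output position k
def pvG (mem_space : List Int) (period : Int) (k : Nat) : Int :=
  PySem.List.pyGetD mem_space (PySem.Int.mod (PySem.Int.mod (k : Int) period) ((mem_space.length : Int))) 0

theorem pvG_period (mem_space : List Int) (period : Int) (hp : 0 < period) (k : Nat) :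
    pvG mem_space period (k + period.toNat) = pvG mem_space period k := by
  unfold pvG
  congr 2
  have hcast : ((k + period.toNat : Nat) : Int) = (k : Int) + period := by
    push_cast [Int.toNat_of_nonneg hp.le]; ring
  rw [hcast, PySem.Int.mod_eq_emod_of_pos hp, PySem.Int.mod_eq_emod_of_pos hp,
    Int.add_emod_right]

theorem pvA_eq (mem_space : List Int) (num_accesses : Int) (period : Int) :
    periodic_access mem_space num_accesses period
      = (List.range num_accesses.toNat).map (pvG mem_space period) := by
  unfold periodic_access
  rw [PySem.List.foldl_append_singleton_eq_map, PySem.List.pyRange_one]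
  simp [List.map_map, pvG, Function.comp]

theorem pvTile (f : Nat → Int) (p r : Nat) (hper : ∀ k, f (k + p) = f k) :
    (List.replicate r ((List.range p).map f)).flatten = (List.range (r * p)).map f := by
  induction r with
  | zero => simp
  | succ r ih =>
    rw [List.replicate_succ, List.flatten_cons, ih, Nat.succ_mul, Nat.add_comm (r * p) p,
      List.range_add, List.map_append, List.map_map]
    congr 1
    apply List.map_congr_left
    intro k _
    simp only [Function.comp_apply]
    rw [Nat.add_comm p k]
    exact (hper k).symm

theorem pvB_eq (mem_space : List Int) (num_accesses : Int) (period : Int)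
    (hp : 0 < period) :
    periodic_access_alt mem_space num_accesses period
      = (List.range num_accesses.toNat).map (pvG mem_space period) := by
  unfold periodic_access_alt
  by_cases hn : num_accesses ≤ 0
  · simp [hn, Int.toNat_of_nonpos hn]
  · simp only [if_neg hn]
    -- the block is the first period.toNat values of pvG
    have hblock : (PySem.List.pyRange 0 period 1).map (fun i =>
        PySem.List.pyGetD mem_space (PySem.Int.mod i ((mem_space.length : Int))) 0)
        = (List.range period.toNat).map (pvG mem_space period) := by
      rw [PySem.List.pyRange_one]
      simp only [sub_zero, List.map_map]
      apply List.map_congr_left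
      intro k hk
      simp only [Function.comp_apply, zero_add, pvG]
      congr 2
      rw [PySem.Int.mod_eq_emod_of_pos hp]
      rw [List.mem_range] at hk
      have : (k : Int) < period := by omega
      rw [Int.emod_eq_of_lt (by positivity) this]
    rw [hblock]
    unfold PySem.List.pyRepeat
    rw [pvTile _ _ _ (pvG_period mem_space period hp)]
    -- reps * period covers num_accesses elements
    set reps : Int := PySem.Int.floordiv num_accesses period + 1 with hreps
    have hdm := PySem.Int.floordiv_mul_add_mod num_accesses period
    have hm0 := PySem.Int.mod_nonneg num_accesses hp
    have hm1 := PySem.Int.mod_lt num_accesses hp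
    have hrpos : 0 < reps := by nlinarith [hdm, hm0, hm1, hp]
    have hmul : reps * period = PySem.Int.floordiv num_accesses period * period + period := by
      rw [hreps]; ring
    have hcov : (num_accesses.toNat : Int) ≤ (reps.toNat : Int) * (period.toNat : Int) := by
      rw [Int.toNat_of_nonneg (le_of_lt hrpos), Int.toNat_of_nonneg hp.le]
      have hnn : (num_accesses.toNat : Int) = num_accesses := Int.toNat_of_nonneg (by omega)
      linarith [hdm, hm1, hnn, hmul]
    have hcov' : num_accesses.toNat ≤ reps.toNat * period.toNat := by exact_mod_cast hcov
    rw [← List.map_take, List.take_range]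
    rw [Nat.min_eq_left hcov']

-- ===== VERDICT (by name: the statement is the Claim_ definition above) =====
theorem periodic_access_spec : Claim_equal_periodic_access := by
  intro mem_space num_accesses period _ hpre
  unfold Spec_periodic_access
  rcases hpre with hn | ⟨hp, _⟩
  · rw [pvA_eq]
    unfold periodic_access_alt
    simp [hn, Int.toNat_of_nonpos hn]
  · rw [pvA_eq, pvB_eq mem_space num_accesses period hp]
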